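-- pv_equiv track=rewrite | github.com/lukematheny/cipherUI | cipher_funcs/dvorak_funcs.py | decipher_dvorak
-- ===== SOURCE A (Python) =====
-- def decipher_dvorak(cipher, layers=1):
--
--     '''
--     decipher_dvorak(cipher, layers=1)
--
--     The cipher is converted from the Dvorak keyboard to the QWERTY keyboard
--     using the same key placements, done over the number of layers.
--
--     Arguments:
--     cipher -- Cipher being deciphered
--     layers -- How many times the cipher is deciphered Dvorak to QWERTY
--
--     Steps:
--     1. Layers is put equal to layers modulo 210, as 210 is when the message
--        repeats itself.
--     2. Each cipher letter found in the Dvorak keyboard is set to the QWERTY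
--        keyboard, and put in the message.
--     3. Step 2 is done as many times as there are layers, with each previous
--        message as the new cipher.
--
--     Returns the message.
--     '''
--
--     ## Variables
--     # Keysets
--     dvorak = list('`1234567890[]\',.pyfgcrl/=\\aoeuidhtns-;qjkxbmwvz~!@#$%^&*'
--                   + '(){}"<>PYFGCRL?+|AOEUIDHTNS_:QJKXBMWVZ ')
--     qwerty = list('`1234567890-=qwertyuiop[]\\asdfghjkl;\'zxcvbnm,./~!@#$%^&*'
--                   + '()_+QWERTYUIOP{}|ASDFGHJKL:"ZXCVBNM<>? ')
--     # Layers
--     layers = int(layers) % 210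
--     if layers == 0: return cipher
--
--     ## Decipher
--     for _ in range(layers):
--         message = ''
--         for letter in cipher:
--             if letter in dvorak:
--                 message += qwerty[dvorak.index(letter)]
--             else:
--                 message += letter
--         cipher = message
--
--     ## Return message
--     return message
-- ===== SOURCE B (Python) =====
-- def decipher_dvorak(cipher, layers=1):
--     dvorak = ('`1234567890[]\',.pyfgcrl/=\\aoeuidhtns-;qjkxbmwvz~!@#$%^&*'
--               + '(){}"<>PYFGCRL?+|AOEUIDHTNS_:QJKXBMWVZ ')
--     qwerty = ('`1234567890-=qwertyuiop[]\\asdfghjkl;\'zxcvbnm,./~!@#$%^&*'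
--               + '()_+QWERTYUIOP{}|ASDFGHJKL:"ZXCVBNM<>? ')
--     layers = int(layers) % 210
--     if layers == 0:
--         return cipher
--     step = dict(zip(dvorak, qwerty))
--     # compose the substitution with itself `layers` times on the fixed alphabet
--     comp = {}
--     for c in dvorak:
--         x = c
--         for _ in range(layers):
--             x = step.get(x, x)
--         comp[c] = x
--     # single pass over the cipher
--     return ''.join(comp.get(ch, ch) for ch in cipher)
-- ===== Notes on version B (the rewrite author's own statement) =====
-- stated objective: faster
-- what changed: Instead of rewriting the whole cipher once per layer with a linear list scan per character, B builds the Dvorak->QWERTY dict once, composes the substitution with itself layers times on the fixed 95-key alphabet, and then translates the cipher in a single pass.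
import Mathlib
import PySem

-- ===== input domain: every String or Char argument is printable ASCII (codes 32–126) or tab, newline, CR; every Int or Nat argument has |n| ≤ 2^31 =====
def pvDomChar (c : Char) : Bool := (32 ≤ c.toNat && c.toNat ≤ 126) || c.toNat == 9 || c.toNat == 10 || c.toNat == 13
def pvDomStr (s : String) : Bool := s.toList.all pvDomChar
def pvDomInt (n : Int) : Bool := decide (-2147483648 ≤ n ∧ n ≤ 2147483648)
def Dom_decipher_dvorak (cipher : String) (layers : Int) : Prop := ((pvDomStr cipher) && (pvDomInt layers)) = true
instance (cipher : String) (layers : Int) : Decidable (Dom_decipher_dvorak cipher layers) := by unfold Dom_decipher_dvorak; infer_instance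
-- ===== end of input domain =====

-- B builds the substitution dict once, composes it with itself `layers` times on the
-- fixed 95-key alphabet, then does a single pass over the cipher (O(95·layers + n)
-- instead of A's O(layers · n · 95) repeated rewrites).

-- ===== PORT A =====
def pvDvorak : List Char :=
  "`1234567890[]',.pyfgcrl/=\\aoeuidhtns-;qjkxbmwvz~!@#$%^&*(){}\"<>PYFGCRL?+|AOEUIDHTNS_:QJKXBMWVZ ".toList

def pvQwerty : List Char :=
  "`1234567890-=qwertyuiop[]\\asdfghjkl;'zxcvbnm,./~!@#$%^&*()_+QWERTYUIOP{}|ASDFGHJKL:\"ZXCVBNM<>? ".toList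

-- Literal port of A: for each of `layers % 210` rounds, rebuild the message character
-- by character, looking the character up by a linear scan (index?) of the dvorak list.
-- `qwerty[dvorak.index(letter)]`: under the membership guard index? is always `some`
-- and in range, so `.getD 0` / pyGetD's default are never the result.
def decipher_dvorak (cipher : String) (layers : Int) : String :=
  let dvorak := pvDvorak
  let qwerty := pvQwerty
  let L := PySem.Int.mod layers 210
  if L == 0 then cipher
  else
    String.ofList ((PySem.List.pyRange 0 L 1).foldl
      (fun cip _ =>
        cip.foldl (fun message letter =>
          if letter ∈ dvorak then
            message ++ [PySem.List.pyGetD qwerty (((PySem.List.index? dvorak letter).getD 0 : Nat) : Int) letter]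
          else
            message ++ [letter]) ([] : List Char))
      cipher.toList)

-- ===== PORT B =====
def decipher_dvorak_alt (cipher : String) (layers : Int) : String :=
  let L := PySem.Int.mod layers 210
  if L == 0 then cipher
  else
    -- step = dict(zip(dvorak, qwerty))
    let step := (pvDvorak.zip pvQwerty).foldl
      (fun d p => d.insert p.1 p.2) (PySem.Dict.empty : PySem.Dict Char Char)
    -- comp[c] = step applied L times to c, for each c of the alphabet
    let comp := pvDvorak.foldl
      (fun d c => d.insert c ((PySem.List.pyRange 0 L 1).foldl (fun x _ => step.getD x x) c))
      (PySem.Dict.empty : PySem.Dict Char Char)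
    -- single pass: ''.join(comp.get(ch, ch) for ch in cipher)
    String.ofList (cipher.toList.map (fun ch => comp.getD ch ch))

-- ===== PRECONDITION & SPEC =====
def Spec_decipher_dvorak (cipher : String) (layers : Int) (out : String) : Prop := out = decipher_dvorak_alt cipher layers
instance (cipher : String) (layers : Int) (out : String) : Decidable (Spec_decipher_dvorak cipher layers out) := by unfold Spec_decipher_dvorak; infer_instance

-- ===== CLAIM (what is proved, stated in full; the proofs are below) =====
def Claim_equal_decipher_dvorak : Prop := ∀ (cipher : String) (layers : Int), Dom_decipher_dvorak cipher layers → Spec_decipher_dvorak cipher layers (decipher_dvorak cipher layers)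

-- ===== LEMMAS AND PROOFS =====

-- A's per-character substitution, as a function.
def pvStepA (c : Char) : Char :=
  if c ∈ pvDvorak then
    PySem.List.pyGetD pvQwerty (((PySem.List.index? pvDvorak c).getD 0 : Nat) : Int) c
  else c

-- B's step dictionary.
def pvStepDict : PySem.Dict Char Char :=
  (pvDvorak.zip pvQwerty).foldl (fun d p => d.insert p.1 p.2) PySem.Dict.empty

-- Lookup in a zip-built dict when the key is absent from the key list.
theorem pv_zipdict_notmem (d q : List Char) (d0 : PySem.Dict Char Char) (c : Char)
    (h : c ∉ d) :
    ((d.zip q).foldl (fun m p => m.insert p.1 p.2) d0).getD c c = d0.getD c c := by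
  induction d generalizing q d0 with
  | nil => simp
  | cons a d' ih =>
    cases q with
    | nil => simp
    | cons b q' =>
      simp only [List.zip_cons_cons, List.foldl_cons]
      rw [ih _ _ (fun hm => h (List.mem_cons_of_mem _ hm))]
      rw [PySem.Dict.getD_insert]
      simp only [List.mem_cons, not_or] at h
      simp [h.1]

-- Lookup in a zip-built dict when the key list has no duplicates and the key occurs.
theorem pv_zipdict_mem (d q : List Char) (d0 : PySem.Dict Char Char) (c : Char)
    (hnd : d.Nodup) (hlen : d.length ≤ q.length) (h : c ∈ d) :
    ((d.zip q).foldl (fun m p => m.insert p.1 p.2) d0).getD c c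
      = PySem.List.pyGetD q (((PySem.List.index? d c).getD 0 : Nat) : Int) c := by
  induction d generalizing q d0 with
  | nil => simp at h
  | cons a d' ih =>
    cases q with
    | nil => simp at hlen
    | cons b q' =>
      simp only [List.zip_cons_cons, List.foldl_cons]
      by_cases hca : c = a
      · subst hca
        have hnot : c ∉ d' := (List.nodup_cons.mp hnd).1
        rw [pv_zipdict_notmem _ _ _ _ hnot, PySem.Dict.getD_insert,
          PySem.List.index?_cons_self]
        simp [PySem.List.pyGetD_zero_cons]
      · have hmem : c ∈ d' := by
          rcases List.mem_cons.mp h with h1 | h1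
          · exact absurd h1 hca
          · exact h1
        rw [ih q' _ (List.nodup_cons.mp hnd).2 (by simpa using hlen) hmem]
        obtain ⟨i, hi⟩ := Option.isSome_iff_exists.mp
          ((PySem.List.index?_isSome_iff d' c).mpr hmem)
        rw [PySem.List.index?_cons_of_ne _ (fun h' => hca h'.symm), hi]
        simp only [Option.map_some, Option.getD_some, PySem.List.pyGetD_natCast,
          List.getD_cons_succ]

-- A's step and B's dict lookup agree on every character.
theorem pv_step_eq (c : Char) : pvStepA c = pvStepDict.getD c c := by
  unfold pvStepA pvStepDict
  by_cases h : c ∈ pvDvorak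
  · rw [if_pos h, pv_zipdict_mem _ _ _ _ (by decide) (by decide) h]
  · rw [if_neg h, pv_zipdict_notmem _ _ _ _ h]
    simp [PySem.Dict.getD_empty]

-- A's inner loop builds exactly the map of pvStepA over the string.
theorem pv_inner_loop (l acc : List Char) :
    l.foldl (fun message letter =>
      if letter ∈ pvDvorak then
        message ++ [PySem.List.pyGetD pvQwerty (((PySem.List.index? pvDvorak letter).getD 0 : Nat) : Int) letter]
      else message ++ [letter]) acc = acc ++ l.map pvStepA := by
  have hf : (fun (message : List Char) (letter : Char) =>
      if letter ∈ pvDvorak then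
        message ++ [PySem.List.pyGetD pvQwerty (((PySem.List.index? pvDvorak letter).getD 0 : Nat) : Int) letter]
      else message ++ [letter]) = fun message letter => message ++ [pvStepA letter] := by
    funext m x
    unfold pvStepA
    by_cases h : x ∈ pvDvorak <;> simp [h]
  rw [hf, PySem.List.foldl_append_singleton_eq_map]

-- Folding `map f` over a list that is only counted is iteration of `map f`.
theorem pv_fold_map_iterate (f : Char → Char) (l : List Int) (s : List Char) :
    l.foldl (fun cip _ => cip.map f) s = s.map f^[l.length] := by
  induction l generalizing s with
  | nil => simp
  | cons a l' ih =>
    simp only [List.foldl_cons, List.length_cons, ih, List.map_map]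
    rw [← Function.iterate_succ f l'.length]

-- Folding a step function over a list that is only counted is iteration.
theorem pv_fold_iterate (g : Char → Char) (l : List Int) (c : Char) :
    l.foldl (fun x _ => g x) c = g^[l.length] c := by
  induction l generalizing c with
  | nil => simp
  | cons a l' ih => simp [ih, Function.iterate_succ_apply]

-- Lookup in the comp dict built by inserting f k for each key k.
theorem pv_compdict (f : Char → Char) (ks : List Char) (d0 : PySem.Dict Char Char) (c : Char) :
    (ks.foldl (fun d k => d.insert k (f k)) d0).getD c c
      = if c ∈ ks then f c else d0.getD c c := by
  induction ks generalizing d0 with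
  | nil => simp
  | cons a ks' ih =>
    simp only [List.foldl_cons, ih, PySem.Dict.getD_insert, List.mem_cons]
    by_cases h1 : c ∈ ks' <;> by_cases h2 : c = a <;> simp [h1, h2]

-- pvStepA fixes characters outside the alphabet, so its iterates do too.
theorem pv_stepA_fixed (c : Char) (h : c ∉ pvDvorak) (n : ℕ) : pvStepA^[n] c = c := by
  apply Function.iterate_fixed
  unfold pvStepA
  rw [if_neg h]

-- ===== VERDICT (by name: the statement is the Claim_ definition above) =====
theorem decipher_dvorak_spec : Claim_equal_decipher_dvorak := by
  intro cipher layers _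
  unfold Spec_decipher_dvorak decipher_dvorak decipher_dvorak_alt
  by_cases h0 : (PySem.Int.mod layers 210) == 0
  · simp only [h0, if_true]
  · simp only [h0, if_false, Bool.false_eq_true]
    have hinner : ∀ cip : List Char,
        cip.foldl (fun message letter =>
          if letter ∈ pvDvorak then
            message ++ [PySem.List.pyGetD pvQwerty (((PySem.List.index? pvDvorak letter).getD 0 : Nat) : Int) letter]
          else message ++ [letter]) ([] : List Char) = cip.map pvStepA := by
      intro cip; rw [pv_inner_loop]; simp
    have houter : (fun (cip : List Char) (_ : Int) =>
        cip.foldl (fun message letter =>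
          if letter ∈ pvDvorak then
            message ++ [PySem.List.pyGetD pvQwerty (((PySem.List.index? pvDvorak letter).getD 0 : Nat) : Int) letter]
          else message ++ [letter]) ([] : List Char))
        = fun cip _ => cip.map pvStepA :=
      funext fun cip => funext fun _ => hinner cip
    congr 1
    rw [houter, pv_fold_map_iterate]
    apply List.map_congr_left
    intro ch _
    rw [pv_compdict]
    by_cases hm : ch ∈ pvDvorak
    · rw [if_pos hm, pv_fold_iterate]
      have : pvStepA = fun c => pvStepDict.getD c c := funext pv_step_eq
      rw [this]
      rfl
    · rw [if_neg hm, PySem.Dict.getD_empty, pv_stepA_fixed ch hm]
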